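-- pv_equiv track=rewrite | github.com/bhhsj98sx-netizen/simple_var_manager | gui_qt.py | _choose_latest_vars
-- ===== SOURCE A (Python) =====
-- def _parse_var_base_and_version(var_filename: str) -> tuple[str, str]:
--     name = var_filename
--     if name.lower().endswith(".var"):
--         name = name[:-4]
--     parts = name.split(".")
--     if len(parts) < 3:
--         return name, ""
--     version = parts[-1]
--     base = ".".join(parts[:-1])
--     return base, version
--
-- def _choose_latest_vars(all_var_names: list[str]) -> set[str]:
--     best: dict[str, tuple[int, str, str]] = {}
--     for fn in all_var_names:
--         base, ver = _parse_var_base_and_version(fn)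
--
--         ver_num = -1
--         try:
--             ver_num = int(ver)
--         except Exception:
--             ver_num = -1
--
--         current = best.get(base)
--         cand = (ver_num, ver, fn)
--         if current is None:
--             best[base] = cand
--         else:
--             if cand[0] > current[0]:
--                 best[base] = cand
--             elif cand[0] == current[0]:
--                 if cand[1] > current[1]:
--                     best[base] = cand
--                 elif cand[1] == current[1]:
--                     if cand[2] > current[2]:
--                         best[base] = cand
--
--     return {t[2] for t in best.values()}
-- ===== SOURCE B (Python) =====
-- def _parse_var_base_and_version(var_filename: str) -> tuple[str, str]:
--     name = var_filename
--     if name.lower().endswith(".var"):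
--         name = name[:-4]
--     parts = name.split(".")
--     if len(parts) < 3:
--         return name, ""
--     version = parts[-1]
--     base = ".".join(parts[:-1])
--     return base, version
--
-- def _version_key(fn: str) -> tuple[int, str, str]:
--     _, ver = _parse_var_base_and_version(fn)
--     try:
--         num = int(ver)
--     except Exception:
--         num = -1
--     return (num, ver, fn)
--
-- def _choose_latest_vars(all_var_names: list[str]) -> set[str]:
--     groups: dict[str, list[str]] = {}
--     for fn in all_var_names:
--         base, _ = _parse_var_base_and_version(fn)
--         groups.setdefault(base, []).append(fn)
--     return {max(group, key=_version_key) for group in groups.values()}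
-- ===== Notes on version B (the rewrite author's own statement) =====
-- stated objective: alternative
-- what changed: A keeps a running best (ver_num, ver, fn) triple per base inside one accumulator dict; B first buckets all filenames by base into a dict of lists, then picks each bucket's winner with max(group, key=version-key) in a second pass.
import Mathlib
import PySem

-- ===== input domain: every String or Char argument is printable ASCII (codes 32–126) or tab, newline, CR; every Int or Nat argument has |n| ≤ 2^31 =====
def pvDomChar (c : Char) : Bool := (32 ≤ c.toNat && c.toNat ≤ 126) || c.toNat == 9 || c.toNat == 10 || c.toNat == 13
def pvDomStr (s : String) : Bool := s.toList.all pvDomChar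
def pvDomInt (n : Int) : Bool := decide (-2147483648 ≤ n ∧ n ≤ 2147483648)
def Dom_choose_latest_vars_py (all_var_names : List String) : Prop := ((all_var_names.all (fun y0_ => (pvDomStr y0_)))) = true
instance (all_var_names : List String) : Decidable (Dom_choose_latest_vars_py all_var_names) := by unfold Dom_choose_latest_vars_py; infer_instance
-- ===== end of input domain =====

-- B replaces A's inline running-best accumulator by a bucket-by-base pass followed by a
-- per-bucket max with the (ver_num, ver, fn) key; same cost, different decomposition.

-- ===== PORT A =====
-- shared helper: _parse_var_base_and_version (identical source in Source A and Source B)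
def parse_var_base_and_version_py (var_filename : String) : String × String :=
  let name := var_filename
  let name := if PySem.Str.endswith (PySem.Str.lower name) ".var" then
      PySem.Str.slice name none (some (-4)) else name
  -- '.' ≠ "" so split? is always `some`: the getD [] default is never taken
  let parts := (PySem.Str.split? name ".").getD []
  if parts.length < 3 then (name, "")
  else
    let version := PySem.List.pyGetD parts (-1) ""    -- parts[-1]; parts ≠ [] since length ≥ 3
    let base := PySem.Str.join "." (PySem.List.slice parts none (some (-1)))
    (base, version)

-- the body of A's `for fn in all_var_names` loop
def pvAStep (best : PySem.Dict String (Int × String × String)) (fn : String) :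
    PySem.Dict String (Int × String × String) :=
  let p := parse_var_base_and_version_py fn
  let base := p.1
  let ver := p.2
  let ver_num : Int := (PySem.Int.ofStr? ver).getD (-1)    -- try int(ver) except: -1
  let cand : Int × String × String := (ver_num, ver, fn)
  match best.get? base with
  | none => best.insert base cand
  | some current =>
    if current.1 < cand.1 then best.insert base cand
    else if cand.1 = current.1 then
      if current.2.1 < cand.2.1 then best.insert base cand
      else if cand.2.1 = current.2.1 then
        if current.2.2 < cand.2.2 then best.insert base cand
        else best
      else best
    else best

def choose_latest_vars_py (all_var_names : List String) : List String :=
  let best := all_var_names.foldl pvAStep PySem.Dict.empty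
  PySem.Set.ofList (best.values.map (fun t => t.2.2))

-- ===== PORT B =====
-- _version_key(fn)
def pvKey (fn : String) : Int × String × String :=
  let ver := (parse_var_base_and_version_py fn).2
  ((PySem.Int.ofStr? ver).getD (-1), ver, fn)

-- Python tuple comparison `_version_key a > _version_key b` (lexicographic)
def pvKeyGT (a b : Int × String × String) : Bool :=
  decide (b.1 < a.1) ||
    (a.1 == b.1 && (decide (b.2.1 < a.2.1) ||
      (a.2.1 == b.2.1 && decide (b.2.2 < a.2.2))))

-- max(group, key=_version_key): first maximal element; exact for nonempty group
-- (Python max raises on []; buckets are never empty, the [] arm is unreachable)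
def pvMaxBy (group : List String) : String :=
  match group with
  | [] => ""
  | h :: t => t.foldl (fun acc x => if pvKeyGT (pvKey x) (pvKey acc) then x else acc) h

def choose_latest_vars_py_alt (all_var_names : List String) : List String :=
  let groups := all_var_names.foldl
    (fun d fn => d.modify (parse_var_base_and_version_py fn).1 [] (· ++ [fn]))
    PySem.Dict.empty
  PySem.Set.ofList (groups.values.map pvMaxBy)

-- ===== PRECONDITION & SPEC =====
def Spec_choose_latest_vars_py (all_var_names : List String) (out : List String) : Prop := out = choose_latest_vars_py_alt all_var_names
instance (all_var_names : List String) (out : List String) : Decidable (Spec_choose_latest_vars_py all_var_names out) := by unfold Spec_choose_latest_vars_py; infer_instance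

-- ===== CLAIM (what is proved, stated in full; the proofs are below) =====
def Claim_equal_choose_latest_vars_py : Prop := ∀ (all_var_names : List String), Dom_choose_latest_vars_py all_var_names → Spec_choose_latest_vars_py all_var_names (choose_latest_vars_py all_var_names)

-- ===== LEMMAS AND PROOFS =====

-- the lift taking B's bucket dict to A's best dict
def pvLift (d : PySem.Dict String (List String)) : PySem.Dict String (Int × String × String) :=
  PySem.Dict.mk (d.items.map (fun p => (p.1, pvKey (pvMaxBy p.2))))

-- B's loop body
def pvBStep (d : PySem.Dict String (List String)) (fn : String) : PySem.Dict String (List String) :=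
  d.modify (parse_var_base_and_version_py fn).1 [] (· ++ [fn])

theorem pvLift_get? (d : PySem.Dict String (List String)) (b : String) :
    (pvLift d).get? b = (d.get? b).map (fun g => pvKey (pvMaxBy g)) := by
  simp [pvLift, PySem.Dict.get?, List.find?_map, Option.map_map, Function.comp_def]

theorem pvLift_contains (d : PySem.Dict String (List String)) (b : String) :
    (pvLift d).contains b = d.contains b := by
  simp [pvLift, PySem.Dict.contains, List.any_map, Function.comp_def]

theorem pvMaxBy_append (g : List String) (hg : g ≠ []) (fn : String) :
    pvMaxBy (g ++ [fn]) =
      if pvKeyGT (pvKey fn) (pvKey (pvMaxBy g)) then fn else pvMaxBy g := by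
  match g with
  | [] => exact absurd rfl hg
  | h :: t => simp [pvMaxBy, List.foldl_append]

-- A's comparison cascade is exactly "replace iff the candidate key is lexicographically greater"
theorem pvCascade (best : PySem.Dict String (Int × String × String)) (b : String)
    (cand current : Int × String × String) :
    (if current.1 < cand.1 then best.insert b cand
     else if cand.1 = current.1 then
       if current.2.1 < cand.2.1 then best.insert b cand
       else if cand.2.1 = current.2.1 then
         if current.2.2 < cand.2.2 then best.insert b cand
         else best
       else best
     else best) =
    (if pvKeyGT cand current then best.insert b cand else best) := by
  simp only [pvKeyGT, Bool.or_eq_true, Bool.and_eq_true, decide_eq_true_eq, beq_iff_eq]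
  split_ifs <;> first | rfl | tauto

theorem pvAStep_eq_if (best : PySem.Dict String (Int × String × String)) (fn : String) :
    pvAStep best fn =
      match best.get? (parse_var_base_and_version_py fn).1 with
      | none => best.insert (parse_var_base_and_version_py fn).1 (pvKey fn)
      | some current =>
        if pvKeyGT (pvKey fn) current then
          best.insert (parse_var_base_and_version_py fn).1 (pvKey fn)
        else best := by
  show (match best.get? (parse_var_base_and_version_py fn).1 with
      | none => best.insert (parse_var_base_and_version_py fn).1 (pvKey fn)
      | some current =>
        if current.1 < (pvKey fn).1 then best.insert (parse_var_base_and_version_py fn).1 (pvKey fn)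
        else if (pvKey fn).1 = current.1 then
          if current.2.1 < (pvKey fn).2.1 then best.insert (parse_var_base_and_version_py fn).1 (pvKey fn)
          else if (pvKey fn).2.1 = current.2.1 then
            if current.2.2 < (pvKey fn).2.2 then best.insert (parse_var_base_and_version_py fn).1 (pvKey fn)
            else best
          else best
        else best) = _
  cases best.get? (parse_var_base_and_version_py fn).1 with
  | none => rfl
  | some current => exact pvCascade best _ (pvKey fn) current

-- the lift commutes with inserting a bucket (value pvKey (pvMaxBy g) on the A side)
theorem pvLift_insert (d : PySem.Dict String (List String)) (b : String) (g : List String) :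
    pvLift (d.insert b g) = (pvLift d).insert b (pvKey (pvMaxBy g)) := by
  apply PySem.Dict.ext
  by_cases hc : d.contains b = true
  · have hc' : (pvLift d).contains b = true := by rw [pvLift_contains]; exact hc
    rw [show (pvLift (d.insert b g)).items
          = (d.insert b g).items.map (fun p => (p.1, pvKey (pvMaxBy p.2))) from rfl,
        PySem.Dict.items_insert_of_contains _ _ hc,
        PySem.Dict.items_insert_of_contains _ _ hc',
        show (pvLift d).items = d.items.map (fun p => (p.1, pvKey (pvMaxBy p.2))) from rfl,
        List.map_map, List.map_map]
    apply List.map_congr_left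
    intro p _
    by_cases hpb : p.1 = b <;> simp [hpb]
  · have hcf : d.contains b = false := by simpa using hc
    have hc' : (pvLift d).contains b = false := by rw [pvLift_contains]; exact hcf
    rw [show (pvLift (d.insert b g)).items
          = (d.insert b g).items.map (fun p => (p.1, pvKey (pvMaxBy p.2))) from rfl,
        PySem.Dict.items_insert_of_not_contains _ _ hcf,
        PySem.Dict.items_insert_of_not_contains _ _ hc']
    simp [pvLift]

-- inserting at an existing key the value already stored there changes nothing (unique keys)
theorem pvInsert_self (d : PySem.Dict String (Int × String × String)) (b : String)
    (v : Int × String × String) (hnd : d.keys.Nodup) (hg : d.get? b = some v) :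
    d.insert b v = d := by
  apply PySem.Dict.ext
  have hc : d.contains b = true := by
    rw [PySem.Dict.contains_eq_isSome_get?, hg]; rfl
  rw [PySem.Dict.items_insert_of_contains _ _ hc]
  conv_rhs => rw [← List.map_id d.items]
  apply List.map_congr_left
  intro p hp
  cases p with
  | mk k w =>
    by_cases hpb : (k == b) = true
    · have hb' : k = b := by simpa using hpb
      have h2 := PySem.Dict.get?_of_mem_items d (k := k) (v := w) (by simpa using hp) hnd
      rw [hb', hg] at h2
      have hw : w = v := by symm; simpa using h2
      simp [hb', hw]
    · simp [hpb]

theorem pvStep_lift (d : PySem.Dict String (List String)) (fn : String)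
    (hnd : d.keys.Nodup) (hne : ∀ p ∈ d.items, p.2 ≠ []) :
    pvAStep (pvLift d) fn = pvLift (pvBStep d fn) := by
  rw [pvAStep_eq_if, pvLift_get?]
  rw [show pvBStep d fn
        = d.insert (parse_var_base_and_version_py fn).1
            (d.getD (parse_var_base_and_version_py fn).1 [] ++ [fn]) from rfl,
      pvLift_insert]
  set b := (parse_var_base_and_version_py fn).1 with hb
  cases hg : d.get? b with
  | none =>
    have hgd : d.getD b [] = [] := by
      rw [PySem.Dict.getD_eq_get?_getD, hg]; rfl
    simp [hgd, pvMaxBy]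
  | some g =>
    obtain ⟨p0, hp0mem, hp0b, hp0v⟩ : ∃ p ∈ d.items, p.1 = b ∧ p.2 = g := by
      have h1 := hg
      simp only [PySem.Dict.get?, Option.map_eq_some_iff] at h1
      obtain ⟨p, hfind, hpv⟩ := h1
      exact ⟨p, List.mem_of_find?_eq_some hfind,
        by simpa using List.find?_some hfind, hpv⟩
    have hgne : g ≠ [] := hp0v ▸ hne p0 hp0mem
    have hgd : d.getD b [] = g := by
      rw [PySem.Dict.getD_eq_get?_getD, hg]; rfl
    rw [hgd, pvMaxBy_append g hgne fn]
    by_cases hGT : pvKeyGT (pvKey fn) (pvKey (pvMaxBy g)) = true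
    · simp [hGT]
    · have hGTf : pvKeyGT (pvKey fn) (pvKey (pvMaxBy g)) = false := by simpa using hGT
      simp only [hGTf, Option.map_some, Bool.false_eq_true, if_false]
      exact (pvInsert_self (pvLift d) b (pvKey (pvMaxBy g))
        (by
          have : (pvLift d).keys = d.keys := by
            simp [pvLift, PySem.Dict.keys, List.map_map, Function.comp_def]
          rw [this]; exact hnd)
        (by rw [pvLift_get?, hg]; rfl)).symm

theorem pvBStep_nodup (d : PySem.Dict String (List String)) (fn : String)
    (hnd : d.keys.Nodup) : (pvBStep d fn).keys.Nodup := by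
  unfold pvBStep PySem.Dict.modify
  exact PySem.Dict.nodup_keys_insert _ _ _ hnd

theorem pvBStep_ne (d : PySem.Dict String (List String)) (fn : String)
    (hne : ∀ p ∈ d.items, p.2 ≠ []) :
    ∀ p ∈ (pvBStep d fn).items, p.2 ≠ [] := by
  intro p hp
  unfold pvBStep PySem.Dict.modify PySem.Dict.insert at hp
  split at hp
  · simp only [List.mem_map] at hp
    obtain ⟨q, hq, hqe⟩ := hp
    by_cases h : (q.1 == (parse_var_base_and_version_py fn).1) = true
    · rw [if_pos h] at hqe; subst hqe; simp
    · rw [if_neg h] at hqe; subst hqe; exact hne q hq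
  · rcases List.mem_append.mp hp with h | h
    · exact hne p h
    · simp only [List.mem_singleton] at h; subst h; simp

theorem pvFold_lift (l : List String) (d : PySem.Dict String (List String))
    (hnd : d.keys.Nodup) (hne : ∀ p ∈ d.items, p.2 ≠ []) :
    l.foldl pvAStep (pvLift d) = pvLift (l.foldl pvBStep d) := by
  induction l generalizing d with
  | nil => rfl
  | cons fn t ih =>
    rw [List.foldl_cons, List.foldl_cons, pvStep_lift d fn hnd hne]
    exact ih (pvBStep d fn) (pvBStep_nodup d fn hnd) (pvBStep_ne d fn hne)

theorem pvLift_values (d : PySem.Dict String (List String)) :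
    (pvLift d).values.map (fun t => t.2.2) = d.values.map pvMaxBy := by
  simp [pvLift, PySem.Dict.values, List.map_map, Function.comp_def, pvKey]

-- ===== VERDICT (by name: the statement is the Claim_ definition above) =====
theorem choose_latest_vars_py_spec : Claim_equal_choose_latest_vars_py := by
  intro all_var_names _
  show PySem.Set.ofList
      (((all_var_names.foldl pvAStep PySem.Dict.empty)).values.map (fun t => t.2.2))
    = PySem.Set.ofList ((all_var_names.foldl pvBStep PySem.Dict.empty).values.map pvMaxBy)
  rw [show (PySem.Dict.empty : PySem.Dict String (Int × String × String))
        = pvLift PySem.Dict.empty from rfl,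
      pvFold_lift _ _ (by simp [PySem.Dict.empty, PySem.Dict.keys])
        (by intro p hp; simp [PySem.Dict.empty] at hp),
      pvLift_values]
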